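-- pv_equiv track=rewrite | github.com/lmingfung13-stack/Citation-checker | tests/generate_segmentation_cases.py | mutate_insert_linebreaks
-- ===== SOURCE A (Python) =====
-- def _normalize_newlines(text: str) -> str:
--     return (text or "").replace("\r\n", "\n").replace("\r", "\n")
--
-- def _find_split_idx(line: str) -> int | None:
--     if len(line) < 28:
--         return None
--     mid = len(line) // 2
--     candidates = []
--     for i, ch in enumerate(line):
--         if ch.isspace() and 5 <= i <= len(line) - 5:
--             candidates.append(i)
--     if not candidates:
--         return None
--     return min(candidates, key=lambda x: abs(x - mid))
--
-- def mutate_insert_linebreaks(text: str) -> str: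
--     lines = _normalize_newlines(text).split("\n")
--     out = []
--     for line in lines:
--         if not line.strip():
--             out.append(line)
--             continue
--         idx = _find_split_idx(line)
--         if idx is None:
--             out.append(line)
--             continue
--         out.append(line[:idx].rstrip())
--         out.append(line[idx + 1 :].lstrip())
--     return "\n".join(out)
-- ===== SOURCE B (Python) =====
-- def _normalize_newlines(text):
--     return (text or "").replace("\r\n", "\n").replace("\r", "\n")
--
--
-- def _find_split_idx(line):
--     # Search outward from the center instead of collecting all candidates.
--     n = len(line)
--     if n < 28:
--         return None
--     mid = n // 2
--     dmax = max(mid - 5, n - 5 - mid)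
--     for d in range(dmax + 1):
--         i = mid - d
--         if 5 <= i and line[i].isspace():
--             return i
--         j = mid + d
--         if j <= n - 5 and line[j].isspace():
--             return j
--     return None
--
--
-- def _line_pieces(line):
--     if not line.strip():
--         return [line]
--     idx = _find_split_idx(line)
--     if idx is None:
--         return [line]
--     return [line[:idx].rstrip(), line[idx + 1:].lstrip()]
--
--
-- def mutate_insert_linebreaks(text):
--     lines = _normalize_newlines(text).split("\n")
--     return "\n".join(p for line in lines for p in _line_pieces(line))
-- ===== Notes on version B (the rewrite author's own statement) =====
-- stated objective: alternative
-- what changed: The split-index finder no longer enumerates the whole line collecting all in-band whitespace indices and then takes min by distance to the middle; it searches outward from the center, checking mid-d then mid+d at each radius, returning the first in-band whitespace hit.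
import Mathlib
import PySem

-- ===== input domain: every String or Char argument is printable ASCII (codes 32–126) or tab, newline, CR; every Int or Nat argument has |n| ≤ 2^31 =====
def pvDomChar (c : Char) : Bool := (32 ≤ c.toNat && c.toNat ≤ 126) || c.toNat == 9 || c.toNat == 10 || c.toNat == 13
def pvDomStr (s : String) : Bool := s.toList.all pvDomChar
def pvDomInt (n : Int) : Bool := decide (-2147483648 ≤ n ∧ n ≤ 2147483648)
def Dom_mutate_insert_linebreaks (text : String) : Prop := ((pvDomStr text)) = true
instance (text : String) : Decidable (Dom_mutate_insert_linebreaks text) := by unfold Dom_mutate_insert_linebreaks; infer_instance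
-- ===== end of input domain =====

-- B replaces A's collect-all-candidates-then-min split finder by an outward search
-- from the cs's center (objective: alternative decomposition, same cs loop).

-- ===== PORT A =====
-- (text or "") = text for str arguments, then "\r\n" → "\n", "\r" → "\n"; shared by both ports
def pvNormalize (text : String) : List Char :=
  PySem.Chars.replace (PySem.Chars.replace text.toList ['\r', '\n'] ['\n']) ['\r'] ['\n']

-- A's _find_split_idx: collect every in-band whitespace index, take min by distance to mid
def pvFindSplitA (cs : List Char) : Option Int :=
  if cs.length < 28 then none
  else
    let mid : Int := PySem.Int.floordiv (cs.length : Int) 2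
    let candidates : List Int :=
      (PySem.List.enumerate cs 0).foldl
        (fun acc p =>
          if PySem.Chars.isspace p.2 && decide (5 ≤ p.1 ∧ p.1 ≤ (cs.length : Int) - 5)
          then acc ++ [p.1] else acc) []
    -- `if not candidates: return None; return min(candidates, key=…)`: min? is none iff empty
    PySem.List.min? candidates (fun x => (x - mid).natAbs)

def mutate_insert_linebreaks (text : String) : String :=
  let lines := PySem.Chars.splitOn (pvNormalize text) ['\n']
  let out := lines.foldl
    (fun acc cs =>
      if (PySem.Chars.strip cs).isEmpty then acc ++ [cs]
      else
        match pvFindSplitA cs with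
        | none => acc ++ [cs]
        | some idx =>
          acc ++ [PySem.Chars.rstrip (PySem.List.slice cs none (some idx)),
                  PySem.Chars.lstrip (PySem.List.slice cs (some (idx + 1)) none)]) []
  String.ofList (PySem.Chars.join ['\n'] out)

-- ===== PORT B =====
-- B's _find_split_idx: walk outward from mid, left side first at each radius
def pvFindSplitB (cs : List Char) : Option Int :=
  if cs.length < 28 then none
  else
    let n : Int := cs.length
    let mid : Int := n / 2            -- n ≥ 28 ≥ 0, so Int `/` is Python's `//` here
    let dmax : Int := max (mid - 5) (n - 5 - mid)
    (PySem.List.pyRange 0 (dmax + 1)).findSome? (fun d =>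
      let i := mid - d
      -- cs[i] read via pyGet?: the guard keeps the index in range, so `.any` is exact
      if decide (5 ≤ i) && (PySem.List.pyGet? cs i).any PySem.Chars.isspace then some i
      else
        let j := mid + d
        if decide (j ≤ n - 5) && (PySem.List.pyGet? cs j).any PySem.Chars.isspace then some j
        else none)

def pvLinePiecesB (cs : List Char) : List (List Char) :=
  if (PySem.Chars.strip cs).isEmpty then [cs]
  else
    match pvFindSplitB cs with
    | none => [cs]
    | some idx =>
      [PySem.Chars.rstrip (PySem.List.slice cs none (some idx)),
       PySem.Chars.lstrip (PySem.List.slice cs (some (idx + 1)) none)]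

def mutate_insert_linebreaks_alt (text : String) : String :=
  String.ofList (PySem.Chars.join ['\n']
    ((PySem.Chars.splitOn (pvNormalize text) ['\n']).flatMap pvLinePiecesB))

-- ===== PRECONDITION & SPEC =====
def Spec_mutate_insert_linebreaks (text : String) (out : String) : Prop := out = mutate_insert_linebreaks_alt text
instance (text : String) (out : String) : Decidable (Spec_mutate_insert_linebreaks text out) := by unfold Spec_mutate_insert_linebreaks; infer_instance

-- ===== CLAIM (what is proved, stated in full; the proofs are below) =====
def Claim_equal_mutate_insert_linebreaks : Prop := ∀ (text : String), Dom_mutate_insert_linebreaks text → Spec_mutate_insert_linebreaks text (mutate_insert_linebreaks text)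

-- ===== LEMMAS AND PROOFS =====

-- valid split position: in-band whitespace index of the line
def pvP (cs : List Char) (x : Int) : Prop :=
  ∃ (k : Nat) (h : k < cs.length), x = (k : Int) ∧ PySem.Chars.isspace cs[k] = true ∧
    5 ≤ x ∧ x ≤ (cs.length : Int) - 5

theorem pvP_guard_left (cs : List Char) (y : Int) (hP : pvP cs y) :
    (decide (5 ≤ y) && (PySem.List.pyGet? cs y).any PySem.Chars.isspace) = true := by
  obtain ⟨k, hk, rfl, hsp, h5, hub⟩ := hP
  rw [PySem.List.pyGet?_natCast, List.getElem?_eq_getElem hk]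
  simp [hsp, h5]

theorem pvP_guard_right (cs : List Char) (y : Int) (hP : pvP cs y) :
    (decide (y ≤ (cs.length : Int) - 5) && (PySem.List.pyGet? cs y).any PySem.Chars.isspace) = true := by
  obtain ⟨k, hk, rfl, hsp, h5, hub⟩ := hP
  rw [PySem.List.pyGet?_natCast, List.getElem?_eq_getElem hk]
  simp [hsp, hub]

theorem pvP_of_guard (cs : List Char) (y : Int)
    (hg : (PySem.List.pyGet? cs y).any PySem.Chars.isspace = true)
    (h5 : 5 ≤ y) (hub : y ≤ (cs.length : Int) - 5) : pvP cs y := by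
  have h0 : 0 ≤ y := by omega
  have hy : y = ((y.toNat : Nat) : Int) := by omega
  rw [hy, PySem.List.pyGet?_natCast] at hg
  cases hgem : cs[y.toNat]? with
  | none => rw [hgem] at hg; simp at hg
  | some c =>
    rw [hgem] at hg
    obtain ⟨hk, hceq⟩ := List.getElem?_eq_some_iff.mp hgem
    exact ⟨y.toNat, hk, hy, by rw [hceq]; simpa using hg, h5, hub⟩

-- Python's min with a key is this foldl (min? restated with a local matcher we can induct on)
theorem pv_min?_eq (l : List Int) (key : Int → Nat) :
    PySem.List.min? l key = l.foldl (fun acc x => match acc with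
      | none => some x
      | some m => if key x < key m then some x else some m) none := by
  unfold PySem.List.min?
  congr 1
  funext acc x
  cases acc <;> rfl

-- running first-min over a strictly increasing tail
theorem pv_min_go_spec (key : Int → Nat) :
    ∀ (t : List Int) (m0 : Int), (∀ y ∈ t, m0 < y) → List.Pairwise (· < ·) t →
    ∃ m, t.foldl (fun acc x => match acc with
        | none => some x
        | some m => if key x < key m then some x else some m) (some m0) = some m ∧
      (m = m0 ∨ m ∈ t) ∧ key m ≤ key m0 ∧ (key m = key m0 → m = m0) ∧
      (∀ y ∈ t, key m ≤ key y ∧ (key m = key y → m ≤ y)) := by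
  intro t
  induction t with
  | nil =>
    intro m0 _ _
    exact ⟨m0, rfl, Or.inl rfl, le_refl _, fun _ => rfl, by simp⟩
  | cons x t ih =>
    intro m0 hlt hpw
    have hxlt := (List.pairwise_cons.mp hpw).1
    have hpw' := (List.pairwise_cons.mp hpw).2
    by_cases hkey : key x < key m0
    · obtain ⟨m, hm, hmem, hle, htie, hall⟩ := ih x hxlt hpw'
      refine ⟨m, ?_, ?_, ?_, ?_, ?_⟩
      · simpa [hkey] using hm
      · rcases hmem with h | h
        · exact Or.inr (by simp [h])
        · exact Or.inr (List.mem_cons_of_mem _ h)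
      · omega
      · intro h; omega
      · intro y hy
        rcases List.mem_cons.mp hy with rfl | hy'
        · exact ⟨hle, fun h => by have := htie h; omega⟩
        · exact hall y hy'
    · have hlt' : ∀ y ∈ t, m0 < y :=
        fun y hy => lt_trans (hlt x List.mem_cons_self) (hxlt y hy)
      obtain ⟨m, hm, hmem, hle, htie, hall⟩ := ih m0 hlt' hpw'
      refine ⟨m, ?_, ?_, hle, htie, ?_⟩
      · simpa [hkey] using hm
      · rcases hmem with h | h
        · exact Or.inl h
        · exact Or.inr (List.mem_cons_of_mem _ h)
      · intro y hy
        rcases List.mem_cons.mp hy with rfl | hy'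
        · refine ⟨by omega, fun h => ?_⟩
          have hm0 : key m = key m0 := by omega
          have := htie hm0
          subst this
          exact le_of_lt (hlt y List.mem_cons_self)
        · exact hall y hy'

-- min with key over a strictly increasing list returns the least index among minimal keys
theorem pv_min?_sorted_spec (key : Int → Nat) (l : List Int) (hpw : List.Pairwise (· < ·) l)
    (m : Int) (hm : PySem.List.min? l key = some m) :
    m ∈ l ∧ ∀ y ∈ l, key m ≤ key y ∧ (key m = key y → m ≤ y) := by
  rw [pv_min?_eq] at hm
  cases l with
  | nil => simp at hm
  | cons x t =>
    rw [List.foldl_cons] at hm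
    have hxlt := (List.pairwise_cons.mp hpw).1
    obtain ⟨m', hm', hmem, hle, htie, hall⟩ :=
      pv_min_go_spec key t x hxlt (List.pairwise_cons.mp hpw).2
    rw [hm'] at hm
    obtain rfl := Option.some.inj hm
    constructor
    · rcases hmem with rfl | h
      · exact List.mem_cons_self
      · exact List.mem_cons_of_mem _ h
    · intro y hy
      rcases List.mem_cons.mp hy with rfl | hy'
      · exact ⟨hle, fun h => by rw [htie h]⟩
      · exact hall y hy'

-- characterization of A's candidate list
theorem pv_candsA (cs : List Char) :
    ((PySem.List.enumerate cs 0).foldl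
      (fun acc p =>
        if PySem.Chars.isspace p.2 && decide (5 ≤ p.1 ∧ p.1 ≤ (cs.length : Int) - 5)
        then acc ++ [p.1] else acc) []) =
    ((PySem.List.enumerate cs 0).filter
      (fun p => PySem.Chars.isspace p.2 && decide (5 ≤ p.1 ∧ p.1 ≤ (cs.length : Int) - 5))).map (·.1) := by
  simpa using PySem.List.foldl_append_if
    (fun p => PySem.Chars.isspace p.2 && decide (5 ≤ p.1 ∧ p.1 ≤ (cs.length : Int) - 5))
    (·.1) (PySem.List.enumerate cs 0) []

theorem pv_mem_candsA (cs : List Char) (x : Int) :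
    x ∈ (((PySem.List.enumerate cs 0).filter
      (fun p => PySem.Chars.isspace p.2 && decide (5 ≤ p.1 ∧ p.1 ≤ (cs.length : Int) - 5))).map (·.1)) ↔
    pvP cs x := by
  simp only [List.mem_map, List.mem_filter, PySem.List.mem_enumerate_iff]
  constructor
  · rintro ⟨p, ⟨⟨k, hk, rfl⟩, hcond⟩, rfl⟩
    simp only [Bool.and_eq_true, decide_eq_true_eq] at hcond
    exact ⟨k, hk, by simp, hcond.1, by simpa using hcond.2.1, by simpa using hcond.2.2⟩
  · rintro ⟨k, hk, rfl, hsp, h5, hub⟩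
    refine ⟨((k : Int), cs[k]), ⟨⟨k, hk, by simp⟩, ?_⟩, rfl⟩
    simp only [Bool.and_eq_true, decide_eq_true_eq]
    exact ⟨hsp, ⟨by simpa using h5, by simpa using hub⟩⟩

theorem pv_pairwise_candsA (cs : List Char) :
    List.Pairwise (· < ·)
      (((PySem.List.enumerate cs 0).filter
        (fun p => PySem.Chars.isspace p.2 && decide (5 ≤ p.1 ∧ p.1 ≤ (cs.length : Int) - 5))).map (·.1)) := by
  refine List.Pairwise.map _ (fun a b h => h) ?_
  exact List.Pairwise.filter _ (PySem.List.pairwise_lt_enumerate cs 0)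

-- B's outward scan over the radii [a, a + k): either no valid position has distance in the
-- window, or it returns the valid position of minimal distance there, left side preferred
theorem pv_Bgo (cs : List Char) (hn : 28 ≤ (cs.length : Int)) (mid : Int)
    (hmid : mid = (cs.length : Int) / 2) :
    ∀ (k : Nat) (a : Int), 0 ≤ a →
    ((PySem.List.pyRange a (a + k)).findSome? (fun d =>
        let i := mid - d
        if decide (5 ≤ i) && (PySem.List.pyGet? cs i).any PySem.Chars.isspace then some i
        else
          let j := mid + d
          if decide (j ≤ (cs.length : Int) - 5) && (PySem.List.pyGet? cs j).any PySem.Chars.isspace then some j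
          else none) = none ∧
      (∀ y, pvP cs y → ((y - mid).natAbs : Int) < a ∨ a + k ≤ ((y - mid).natAbs : Int)))
    ∨ (∃ m, (PySem.List.pyRange a (a + k)).findSome? (fun d =>
        let i := mid - d
        if decide (5 ≤ i) && (PySem.List.pyGet? cs i).any PySem.Chars.isspace then some i
        else
          let j := mid + d
          if decide (j ≤ (cs.length : Int) - 5) && (PySem.List.pyGet? cs j).any PySem.Chars.isspace then some j
          else none) = some m ∧ pvP cs m ∧ a ≤ ((m - mid).natAbs : Int) ∧
        (∀ y, pvP cs y → ((y - mid).natAbs : Int) < a ∨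
          ((m - mid).natAbs ≤ (y - mid).natAbs ∧ ((m - mid).natAbs = (y - mid).natAbs → m ≤ y)))) := by
  have hmid14 : 14 ≤ mid := by omega
  have hmidub : mid ≤ (cs.length : Int) - 5 := by omega
  intro k
  induction k with
  | zero =>
    intro a ha
    left
    constructor
    · have : PySem.List.pyRange a (a + (0 : Nat)) = [] := by
        simp [PySem.List.pyRange]
      rw [this, List.findSome?_nil]
    · intro y _
      omega
  | succ k ih =>
    intro a ha
    have hcons : PySem.List.pyRange a (a + ((k : Nat) + 1 : Nat)) =
        a :: PySem.List.pyRange (a + 1) (a + ((k : Nat) + 1 : Nat)) :=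
      PySem.List.pyRange_one_cons (by push_cast; omega)
    have hshift : a + (((k : Nat) + 1 : Nat) : Int) = (a + 1) + (k : Int) := by push_cast; ring
    by_cases hgl : (decide (5 ≤ mid - a) && (PySem.List.pyGet? cs (mid - a)).any PySem.Chars.isspace) = true
    · right
      refine ⟨mid - a, ?_, ?_, ?_, ?_⟩
      · rw [hcons, List.findSome?_cons]
        simp [hgl]
      · exact pvP_of_guard cs (mid - a)
          ((Bool.and_eq_true .. ▸ hgl).2)
          (of_decide_eq_true ((Bool.and_eq_true .. ▸ hgl).1)) (by omega)
      · omega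
      · intro y hy
        obtain ⟨ky, hky, hyk, _, h5y, huby⟩ := hy
        by_cases hd : ((y - mid).natAbs : Int) < a
        · exact Or.inl hd
        · refine Or.inr ⟨by omega, fun hda => ?_⟩
          omega
    · by_cases hgr : (decide (mid + a ≤ (cs.length : Int) - 5) && (PySem.List.pyGet? cs (mid + a)).any PySem.Chars.isspace) = true
      · right
        refine ⟨mid + a, ?_, ?_, ?_, ?_⟩
        · rw [hcons, List.findSome?_cons]
          simp [hgl, hgr]
        · exact pvP_of_guard cs (mid + a)
            ((Bool.and_eq_true .. ▸ hgr).2)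
            (by omega) (of_decide_eq_true ((Bool.and_eq_true .. ▸ hgr).1))
        · omega
        · intro y hy
          by_cases hd : ((y - mid).natAbs : Int) < a
          · exact Or.inl hd
          · refine Or.inr ⟨by omega, fun hda => ?_⟩
            have : y = mid - a ∨ y = mid + a := by omega
            rcases this with rfl | rfl
            · exact absurd (pvP_guard_left cs (mid - a) hy) hgl
            · exact le_refl _
      · -- no hit at radius a
        have hnone : ∀ y, pvP cs y → ((y - mid).natAbs : Int) ≠ a := by
          intro y hy hda
          have : y = mid - a ∨ y = mid + a := by omega
          rcases this with rfl | rfl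
          · exact absurd (pvP_guard_left cs (mid - a) hy) hgl
          · exact absurd (pvP_guard_right cs (mid + a) hy) hgr
        have hstep : (PySem.List.pyRange a (a + ((k : Nat) + 1 : Nat))).findSome? (fun d =>
            let i := mid - d
            if decide (5 ≤ i) && (PySem.List.pyGet? cs i).any PySem.Chars.isspace then some i
            else
              let j := mid + d
              if decide (j ≤ (cs.length : Int) - 5) && (PySem.List.pyGet? cs j).any PySem.Chars.isspace then some j
              else none) =
            (PySem.List.pyRange (a + 1) ((a + 1) + (k : Nat))).findSome? (fun d =>
            let i := mid - d
            if decide (5 ≤ i) && (PySem.List.pyGet? cs i).any PySem.Chars.isspace then some i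
            else
              let j := mid + d
              if decide (j ≤ (cs.length : Int) - 5) && (PySem.List.pyGet? cs j).any PySem.Chars.isspace then some j
              else none) := by
          rw [hcons, List.findSome?_cons]
          simp [hgl, hgr]
          rw [show a + (((k : Nat) : Int) + 1) = (a + 1) + ((k : Nat) : Int) from by ring]
        rcases ih (a + 1) (by omega) with ⟨hfind, hall⟩ | ⟨m, hfind, hPm, hge, hmin⟩
        · left
          refine ⟨by rw [hstep]; exact hfind, fun y hy => ?_⟩
          have hne := hnone y hy
          rcases hall y hy with h | h
          · left; omega
          · right; push_cast at h ⊢; omega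
        · right
          refine ⟨m, by rw [hstep]; exact hfind, hPm, by omega, fun y hy => ?_⟩
          rcases hmin y hy with h | h
          · left
            have := hnone y hy
            omega
          · exact Or.inr h
  
-- the two split finders agree
theorem pv_find_eq (cs : List Char) : pvFindSplitA cs = pvFindSplitB cs := by
  unfold pvFindSplitA pvFindSplitB
  by_cases h28 : cs.length < 28
  · simp [h28]
  · rw [if_neg h28, if_neg h28]
    dsimp only
    have hn28 : 28 ≤ (cs.length : Int) := by omega
    have hfd : PySem.Int.floordiv (cs.length : Int) 2 = (cs.length : Int) / 2 := by
      unfold PySem.Int.floordiv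
      rw [Int.fdiv_eq_ediv]
      simp
    rw [hfd, pv_candsA]
    set mid : Int := (cs.length : Int) / 2 with hmid
    set dmax : Int := max (mid - 5) ((cs.length : Int) - 5 - mid) with hdmax
    have hmid14 : 14 ≤ mid := by omega
    have hdmax9 : 9 ≤ dmax := le_trans (by omega) (le_max_left _ _)
    have hcov : ∀ z, pvP cs z → ((z - mid).natAbs : Int) ≤ dmax := by
      intro z hz
      obtain ⟨kz, hkz, rfl, _, h5z, hubz⟩ := hz
      rcases max_cases (mid - 5) ((cs.length : Int) - 5 - mid) with ⟨hmx, hle⟩ | ⟨hmx, hlt⟩ <;>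
        rw [hdmax, hmx] <;> omega
    set k : Nat := (dmax + 1).toNat with hk
    have hkcast : ((k : Nat) : Int) = dmax + 1 := by omega
    rw [show dmax + 1 = (0 : Int) + ((k : Nat) : Int) from by omega]
    set cands := ((PySem.List.enumerate cs 0).filter
      (fun p => PySem.Chars.isspace p.2 && decide (5 ≤ p.1 ∧ p.1 ≤ (cs.length : Int) - 5))).map (·.1) with hcands
    rcases pv_Bgo cs hn28 mid hmid k 0 (le_refl 0) with ⟨hfind, hall⟩ | ⟨m, hfind, hPm, _, hmin⟩
    · -- B finds nothing in the full window: no valid position at all, A's candidates empty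
      have hnoP : ∀ y, ¬ pvP cs y := by
        intro y hy
        rcases hall y hy with h | h
        · omega
        · have := hcov y hy
          omega
      have hnil : cands = [] := by
        rw [List.eq_nil_iff_forall_not_mem]
        intro x hx
        exact hnoP x ((pv_mem_candsA cs x).mp hx)
      rw [hfind, hnil, pv_min?_eq]
      rfl
    · -- B finds m; A's min over candidates is the same position
      rw [hfind]
      cases hA : PySem.List.min? cands (fun x => (x - mid).natAbs) with
      | none =>
        rw [PySem.List.min?_eq_none_iff] at hA
        have hm' : m ∈ cands := by rw [hcands]; exact (pv_mem_candsA cs m).mpr hPm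
        rw [hA] at hm'
        simp at hm'
      | some mA =>
        obtain ⟨hmemA, hminA⟩ := pv_min?_sorted_spec _ cands (pv_pairwise_candsA cs) mA hA
        have hPA : pvP cs mA := (pv_mem_candsA cs mA).mp hmemA
        have h1 : (mA - mid).natAbs ≤ (m - mid).natAbs :=
          (hminA m ((pv_mem_candsA cs m).mpr hPm)).1
        rcases hmin mA hPA with h | ⟨h2, htie⟩
        · omega
        · have hkeq : (mA - mid).natAbs = (m - mid).natAbs := le_antisymm h1 h2
          have hle1 : mA ≤ m := (hminA m ((pv_mem_candsA cs m).mpr hPm)).2 hkeq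
          have hle2 : m ≤ mA := htie hkeq.symm
          rw [le_antisymm hle1 hle2]

-- A's whole-output fold = flatMap of B's per-line pieces
theorem pv_foldl_pieces (lines : List (List Char)) (acc : List (List Char)) :
    lines.foldl
      (fun acc cs =>
        if (PySem.Chars.strip cs).isEmpty then acc ++ [cs]
        else
          match pvFindSplitA cs with
          | none => acc ++ [cs]
          | some idx =>
            acc ++ [PySem.Chars.rstrip (PySem.List.slice cs none (some idx)),
                    PySem.Chars.lstrip (PySem.List.slice cs (some (idx + 1)) none)]) acc =
    acc ++ lines.flatMap pvLinePiecesB := by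
  induction lines generalizing acc with
  | nil => simp
  | cons cs rest ih =>
    rw [List.foldl_cons, List.flatMap_cons, ih]
    have hline : (if (PySem.Chars.strip cs).isEmpty then acc ++ [cs]
        else
          match pvFindSplitA cs with
          | none => acc ++ [cs]
          | some idx =>
            acc ++ [PySem.Chars.rstrip (PySem.List.slice cs none (some idx)),
                    PySem.Chars.lstrip (PySem.List.slice cs (some (idx + 1)) none)]) =
        acc ++ pvLinePiecesB cs := by
      unfold pvLinePiecesB
      rw [pv_find_eq cs]
      split_ifs with h
      · rfl
      · cases pvFindSplitB cs <;> rfl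
    rw [hline, List.append_assoc]

-- ===== VERDICT (by name: the statement is the Claim_ definition above) =====
theorem mutate_insert_linebreaks_spec : Claim_equal_mutate_insert_linebreaks := by
  intro text _
  unfold Spec_mutate_insert_linebreaks mutate_insert_linebreaks mutate_insert_linebreaks_alt
  dsimp only
  rw [pv_foldl_pieces]
  rfl
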